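-- pv_equiv track=rewrite | github.com/hyunkoome/Study_CodingTest | 01_CodingTest_Tomorrow/02_string/08 문자열 나누기.py | solution
-- ===== SOURCE A (Python) =====
-- from collections import deque
--
-- def solution(s):
--     res_list = []
--     res_str_list = []
--     que_s = deque(s)
--     split_cnt = 0
--
--     while que_s:
--         sub_list = []
--         sub_str = ''
--         first_char = que_s.popleft()  # 첫번째 글자 꺼내기
--         cnt_x = 1
--         not_x_cnt = 0
--         sub_list.append(first_char)
--         sub_str += first_char  # 첫 글자를 바로 문자열로 추가
--
--         while que_s:
--             crt_char = que_s.popleft()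
--             if crt_char == first_char:
--                 cnt_x += 1
--             else:
--                 not_x_cnt += 1
--
--             sub_list.append(crt_char)
--             sub_str += crt_char  # 현재 글자를 바로 문자열로 추가
--
--             if cnt_x == not_x_cnt:
--                 split_cnt += 1
--                 res_list.append(sub_list)
--                 res_str_list.append(sub_str)
--                 break
--
--         if not que_s and (cnt_x != not_x_cnt):
--             res_list.append(sub_list)
--             res_str_list.append(sub_str)
--             split_cnt += 1
--
--     return split_cnt, res_list, res_str_list
-- ===== SOURCE B (Python) =====
-- def solution(s):
--     # pass 1: balance scan recording segment lengths
--     lens = []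
--     bal = 0
--     cur = 0
--     first = ''
--     for c in s:
--         if bal == 0:
--             first = c
--             bal = 1
--         elif c == first:
--             bal += 1
--         else:
--             bal -= 1
--         cur += 1
--         if bal == 0:
--             lens.append(cur)
--             cur = 0
--     if cur > 0:
--         lens.append(cur)
--     # pass 2: slice the string by the recorded lengths
--     res_list = []
--     res_str_list = []
--     pos = 0
--     for n in lens:
--         seg = s[pos:pos + n]
--         res_list.append(list(seg))
--         res_str_list.append(seg)
--         pos += n
--     return len(lens), res_list, res_str_list
-- ===== Notes on version B (the rewrite author's own statement) =====
-- stated objective: simpler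
-- what changed: Replaced A's nested deque loops that build each sub-list and sub-string inline (with two separate match/mismatch counters and a post-loop re-append check) by two flat passes: a single balance-counter scan over the string that records segment lengths, then a slicing pass that turns each length into the substring and its character list.
import Mathlib
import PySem

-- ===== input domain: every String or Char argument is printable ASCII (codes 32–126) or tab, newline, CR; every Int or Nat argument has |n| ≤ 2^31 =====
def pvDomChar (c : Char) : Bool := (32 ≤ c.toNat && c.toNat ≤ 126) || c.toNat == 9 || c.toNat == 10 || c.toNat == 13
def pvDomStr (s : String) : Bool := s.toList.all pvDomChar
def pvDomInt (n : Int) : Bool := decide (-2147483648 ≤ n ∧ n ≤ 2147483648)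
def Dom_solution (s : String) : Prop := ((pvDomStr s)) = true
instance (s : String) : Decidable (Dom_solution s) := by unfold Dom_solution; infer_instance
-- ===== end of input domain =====

-- B replaces A's nested deque loops (which build every sub-list/sub-string inline) by a flat
-- balance-counter scan recording segment lengths, then a separate slicing pass (objective: simpler).

-- ===== PORT A =====
-- inner 'while que_s' loop: returns (remaining queue, sub_list, sub_str, cnt_x, not_x_cnt, broke?)
def innerA (fc : Char) (cx nx : Int) (subL : List String) (subS : List Char) :
    List Char → List Char × List String × List Char × Int × Int × Bool
  | [] => ([], subL, subS, cx, nx, false)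
  | c :: rest =>
    let cx' := if c = fc then cx + 1 else cx
    let nx' := if c = fc then nx else nx + 1
    let subL' := subL ++ [String.ofList [c]]
    let subS' := subS ++ [c]
    if cx' = nx' then (rest, subL', subS', cx', nx', true)
    else innerA fc cx' nx' subL' subS' rest

-- the remaining queue is never longer than the input (for termination of outerA)
theorem innerA_len_le (fc : Char) : ∀ (l : List Char) (cx nx : Int) (subL : List String) (subS : List Char),
    (innerA fc cx nx subL subS l).1.length ≤ l.length := by
  intro l
  induction l with
  | nil => intro cx nx subL subS; simp [innerA]
  | cons c rest ih =>
    intro cx nx subL subS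
    simp only [innerA]
    split_ifs <;> first
      | (simp; done)
      | exact le_trans (ih _ _ _ _) (Nat.le_succ _)

-- outer 'while que_s' loop
def outerA : List Char → Int × List (List String) × List String
  | [] => (0, [], [])
  | fc :: rest =>
    -- t = (que_s, sub_list, sub_str, cnt_x, not_x_cnt, broke) after the inner while loop
    let t := innerA fc 1 0 [String.ofList [fc]] [fc] rest
    if t.2.2.2.2.2 then
      let r := outerA t.1
      (r.1 + 1, t.2.1 :: r.2.1, String.ofList t.2.2.1 :: r.2.2)
    else if t.1 = [] ∧ t.2.2.2.1 ≠ t.2.2.2.2.1 then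
      (1, [t.2.1], [String.ofList t.2.2.1])
    else
      outerA t.1
termination_by l => l.length
decreasing_by
  all_goals
    exact Nat.lt_succ_of_le (innerA_len_le fc rest 1 0 [String.ofList [fc]] [fc])

def solution (s : String) : Int × List (List String) × List String :=
  outerA s.toList

-- ===== PORT B =====
-- pass 1: single balance-counter scan, recording each segment's length when the balance hits 0,
-- plus the trailing unfinished segment ('first' starts as '' in Python: unread while bal = 0)
def scanB (first : Char) (bal : Int) (cur : Nat) : List Char → List Nat
  | [] => if 0 < cur then [cur] else []
  | c :: rest =>
    let fb := if bal = 0 then (c, (1 : Int)) else if c = first then (first, bal + 1) else (first, bal - 1)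
    let cur' := cur + 1
    if fb.2 = 0 then cur' :: scanB fb.1 0 0 rest
    else scanB fb.1 fb.2 cur' rest

-- pass 2: slice the original character list by the recorded lengths (s[pos:pos+n])
def buildB (cs : List Char) : List Nat → Nat → List (List String) × List String
  | [], _ => ([], [])
  | n :: lens, pos =>
    let seg := PySem.List.slice cs (some (pos : Int)) (some ((pos : Int) + (n : Int)))
    let r := buildB cs lens (pos + n)
    (seg.map (fun c => String.ofList [c]) :: r.1, String.ofList seg :: r.2)

def solution_alt (s : String) : Int × List (List String) × List String :=
  let cs := s.toList
  let lens := scanB ' ' 0 0 cs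
  let r := buildB cs lens 0
  ((lens.length : Int), r.1, r.2)

-- ===== PRECONDITION & SPEC =====
def Spec_solution (s : String) (out : Int × List (List String) × List String) : Prop := out = solution_alt s
instance (s : String) (out : Int × List (List String) × List String) : Decidable (Spec_solution s out) := by unfold Spec_solution; infer_instance

-- ===== CLAIM (what is proved, stated in full; the proofs are below) =====
def Claim_equal_solution : Prop := ∀ (s : String), Dom_solution s → Spec_solution s (solution s)

-- ===== LEMMAS AND PROOFS =====

-- scanB with bal = 0 and cur = 0 ignores 'first'
theorem scanB_zero_irrel (f f' : Char) (l : List Char) : scanB f 0 0 l = scanB f' 0 0 l := by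
  cases l with
  | nil => rfl
  | cons c rest => simp [scanB]

-- accumulator lemma for A's inner loop
theorem innerA_acc (fc : Char) : ∀ (l : List Char) (cx nx : Int) (L : List String) (S : List Char),
    innerA fc cx nx L S l =
      ((innerA fc cx nx [] [] l).1,
       L ++ (innerA fc cx nx [] [] l).2.1,
       S ++ (innerA fc cx nx [] [] l).2.2.1,
       (innerA fc cx nx [] [] l).2.2.2) := by
  intro l
  induction l with
  | nil => intro cx nx L S; simp [innerA]
  | cons c rest ih =>
    intro cx nx L S
    by_cases hc : (if c = fc then cx + 1 else cx) = (if c = fc then nx else nx + 1)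
    · simp [innerA, hc]
    · simp only [innerA, if_neg hc, List.nil_append]
      rw [ih, ih _ _ [String.ofList [c]] [c]]
      simp

theorem innerA_props : ∀ (l : List Char) (fc : Char) (cx nx : Int), 1 ≤ cx - nx →
    (innerA fc cx nx [] [] l).2.2.1 ++ (innerA fc cx nx [] [] l).1 = l ∧
    (innerA fc cx nx [] [] l).2.1 = (innerA fc cx nx [] [] l).2.2.1.map (fun c => String.ofList [c]) ∧
    ((innerA fc cx nx [] [] l).2.2.2.2.2 = false →
      (innerA fc cx nx [] [] l).1 = [] ∧
      (innerA fc cx nx [] [] l).2.2.2.1 ≠ (innerA fc cx nx [] [] l).2.2.2.2.1) ∧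
    (∀ (cur : Nat) (d : Char), 0 < cur →
      scanB fc (cx - nx) cur l =
        if (innerA fc cx nx [] [] l).2.2.2.2.2 then
          (cur + (innerA fc cx nx [] [] l).2.2.1.length) :: scanB d 0 0 (innerA fc cx nx [] [] l).1
        else [cur + (innerA fc cx nx [] [] l).2.2.1.length]) := by
  intro l
  induction l with
  | nil =>
    intro fc cx nx hb
    refine ⟨by simp [innerA], by simp [innerA], by simp [innerA]; omega, ?_⟩
    intro cur d hc
    simp [innerA, scanB, hc]
  | cons c rest ih =>
    intro fc cx nx hb
    have hbne : cx - nx ≠ 0 := by omega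
    by_cases hceq : c = fc
    · -- matching char: balance goes up, never 0, so no break here
      have hne : ¬ ((cx + 1 : Int) = nx) := by omega
      obtain ⟨h1, h2, h3, h4⟩ := ih fc (cx + 1) nx (by omega)
      have hunf : innerA fc cx nx [] [] (c :: rest) =
          ((innerA fc (cx+1) nx [] [] rest).1,
           [String.ofList [c]] ++ (innerA fc (cx+1) nx [] [] rest).2.1,
           [c] ++ (innerA fc (cx+1) nx [] [] rest).2.2.1,
           (innerA fc (cx+1) nx [] [] rest).2.2.2) := by
        have hacc := innerA_acc fc rest (cx+1) nx [String.ofList [fc]] [fc]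
        simpa [innerA, hceq, hne] using hacc
      rw [hunf]
      refine ⟨by simpa using h1, by simpa using h2, h3, ?_⟩
      intro cur d hc
      have hsc : scanB fc (cx - nx) cur (c :: rest) = scanB fc ((cx + 1) - nx) (cur + 1) rest := by
        have hb2 : cx - nx + 1 = (cx + 1) - nx := by ring
        have hb1 : ¬ ((cx + 1) - nx = 0) := by omega
        simp [scanB, hbne, hceq, hb2, hb1]
      rw [hsc, h4 (cur + 1) d (by omega)]
      split <;>
      · congr 1
        simp only [List.length_append, List.length_cons, List.length_nil]
        omega
    · -- non-matching char
      by_cases hz : cx = nx + 1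
      · -- cnt_x == not_x_cnt: the inner loop breaks on this char
        have hbr : ((if c = fc then cx + 1 else cx) = if c = fc then nx else nx + 1) := by
          simp [hceq]; omega
        have hunf : innerA fc cx nx [] [] (c :: rest) =
            (rest, [String.ofList [c]], [c], cx, nx + 1, true) := by
          simp [innerA, hceq, hz]
        rw [hunf]
        refine ⟨rfl, by simp, by simp, ?_⟩
        intro cur d hc
        have hb1 : cx - nx = 1 := by omega
        simp [scanB, hceq, hb1, scanB_zero_irrel fc d rest]
      · have hne : ¬ ((if c = fc then cx + 1 else cx) = if c = fc then nx else nx + 1) := by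
          simp [hceq]; omega
        obtain ⟨h1, h2, h3, h4⟩ := ih fc cx (nx + 1) (by omega)
        have hunf : innerA fc cx nx [] [] (c :: rest) =
            ((innerA fc cx (nx+1) [] [] rest).1,
             [String.ofList [c]] ++ (innerA fc cx (nx+1) [] [] rest).2.1,
             [c] ++ (innerA fc cx (nx+1) [] [] rest).2.2.1,
             (innerA fc cx (nx+1) [] [] rest).2.2.2) := by
          have hacc := innerA_acc fc rest cx (nx+1) [String.ofList [c]] [c]
          simpa [innerA, hceq, hz] using hacc
        rw [hunf]
        refine ⟨by simpa using h1, by simpa using h2, h3, ?_⟩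
        intro cur d hc
        have hsc : scanB fc (cx - nx) cur (c :: rest) = scanB fc (cx - (nx + 1)) (cur + 1) rest := by
          have hb2 : cx - nx - 1 = cx - (nx + 1) := by ring
          have hb1 : ¬ (cx - (nx + 1) = 0) := by omega
          simp [scanB, hbne, hceq, hb2, hb1]
        rw [hsc, h4 (cur + 1) d (by omega)]
        split <;>
        · congr 1
          simp only [List.length_append, List.length_cons, List.length_nil]
          omega

theorem buildB_shift : ∀ (lens : List Nat) (cs : List Char) (pos : Nat),
    buildB cs lens pos = buildB (cs.drop pos) lens 0 := by
  intro lens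
  induction lens with
  | nil => intro cs pos; simp [buildB]
  | cons n lens ih =>
    intro cs pos
    simp only [buildB]
    rw [ih cs (pos + n), ih (cs.drop pos) (0 + n)]
    have hsl : PySem.List.slice cs (some (pos : Int)) (some ((pos : Int) + (n : Int))) =
        (cs.drop pos).take n := PySem.List.slice_natCast_add cs pos n
    have hsl0 : PySem.List.slice (cs.drop pos) (some ((0:Nat) : Int)) (some (((0:Nat) : Int) + (n : Int))) =
        ((cs.drop pos).drop 0).take n := PySem.List.slice_natCast_add (cs.drop pos) 0 n
    simp only [Nat.cast_zero] at hsl0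
    rw [hsl]
    simp [List.drop_drop, Nat.add_comm pos n]

theorem outerA_eq (l : List Char) :
    outerA l = (((scanB ' ' 0 0 l).length : Int),
                (buildB l (scanB ' ' 0 0 l) 0).1,
                (buildB l (scanB ' ' 0 0 l) 0).2) := by
  induction l using outerA.induct with
  | case1 => simp [outerA, scanB, buildB]
  | case2 fc rest t ht ih =>
    have hacc := innerA_acc fc rest 1 0 [String.ofList [fc]] [fc]
    have ht' : (innerA fc 1 0 [String.ofList [fc]] [fc] rest).2.2.2.2.2 = true := ht
    have ih' :
        outerA (innerA fc 1 0 [String.ofList [fc]] [fc] rest).1 =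
          (((scanB ' ' 0 0 (innerA fc 1 0 [String.ofList [fc]] [fc] rest).1).length : Int),
           (buildB (innerA fc 1 0 [String.ofList [fc]] [fc] rest).1 (scanB ' ' 0 0 (innerA fc 1 0 [String.ofList [fc]] [fc] rest).1) 0).1,
           (buildB (innerA fc 1 0 [String.ofList [fc]] [fc] rest).1 (scanB ' ' 0 0 (innerA fc 1 0 [String.ofList [fc]] [fc] rest).1) 0).2) := ih
    clear ht ih
    rw [hacc] at ht' ih'
    simp only at ht' ih'
    obtain ⟨h1, h2, h3, h4⟩ := innerA_props rest fc 1 0 (by norm_num)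
    -- the first pass emits this segment's length, then continues on the remainder
    have h40 := h4 1 ' ' (by norm_num)
    rw [ht'] at h40
    simp only [if_true] at h40
    have hscan2 : scanB ' ' 0 0 (fc :: rest) =
        (1 + (innerA fc 1 0 [] [] rest).2.2.1.length) :: scanB ' ' 0 0 (innerA fc 1 0 [] [] rest).1 := by
      rw [← h40]
      norm_num [scanB]
    rw [outerA]
    simp only
    rw [hacc]
    simp only [ht', if_true, ih', hscan2]
    clear hacc ht' ih' h40 h4 h3 hscan2
    generalize hg : innerA fc 1 0 [] [] rest = C at h1 h2 ⊢
    obtain ⟨R, SL, Y, cx, nx, bk⟩ := C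
    simp only at h1 h2 ⊢
    subst h1
    have h0 : PySem.List.slice (fc :: (Y ++ R)) (some ((0 : Nat) : Int))
        (some (((0 : Nat) : Int) + ((1 + Y.length : Nat) : Int))) =
        (fc :: (Y ++ R)).take (1 + Y.length) := by
      simpa using PySem.List.slice_natCast_add (fc :: (Y ++ R)) 0 (1 + Y.length)
    have htake : (fc :: (Y ++ R)).take (1 + Y.length) = fc :: Y := by
      rw [Nat.add_comm 1]
      simp [List.take_succ_cons]
    have hdrop : (fc :: (Y ++ R)).drop (1 + Y.length) = R := by
      rw [Nat.add_comm 1]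
      simp [List.drop_succ_cons]
    rw [buildB]
    simp only [Nat.cast_zero] at h0 ⊢
    rw [h0, htake]
    rw [buildB_shift _ (fc :: (Y ++ R)) _]
    simp only [zero_add, hdrop, h2]
    refine Prod.ext ?_ (Prod.ext ?_ ?_) <;> simp
  | case3 fc rest t ht hcond =>
    have hacc := innerA_acc fc rest 1 0 [String.ofList [fc]] [fc]
    have ht' : ¬ (innerA fc 1 0 [String.ofList [fc]] [fc] rest).2.2.2.2.2 = true := ht
    have hc' : (innerA fc 1 0 [String.ofList [fc]] [fc] rest).1 = [] ∧
        (innerA fc 1 0 [String.ofList [fc]] [fc] rest).2.2.2.1 ≠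
          (innerA fc 1 0 [String.ofList [fc]] [fc] rest).2.2.2.2.1 := hcond
    rw [hacc] at ht' hc'
    simp only at ht' hc'
    obtain ⟨h1, h2, h3, h4⟩ := innerA_props rest fc 1 0 (by norm_num)
    have hbf : (innerA fc 1 0 [] [] rest).2.2.2.2.2 = false := by
      cases hx : (innerA fc 1 0 [] [] rest).2.2.2.2.2
      · rfl
      · exact absurd hx ht'
    have h40 := h4 1 ' ' (by norm_num)
    rw [hbf] at h40
    simp only [if_false, Bool.false_eq_true] at h40
    have hscan2 : scanB ' ' 0 0 (fc :: rest) = [1 + (innerA fc 1 0 [] [] rest).2.2.1.length] := by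
      rw [← h40]
      norm_num [scanB]
    have hY : (innerA fc 1 0 [] [] rest).2.2.1 = rest := by
      have := h1
      rw [hc'.1] at this
      simpa using this
    rw [outerA]
    simp only
    rw [hacc]
    simp only [ht', if_false, hc', ne_eq, not_false_iff, and_true, if_true, hscan2, Bool.false_eq_true]
    have h0 : PySem.List.slice (fc :: rest) (some ((0 : Nat) : Int))
        (some (((0 : Nat) : Int) + ((1 + (innerA fc 1 0 [] [] rest).2.2.1.length : Nat) : Int))) =
        (fc :: rest).take (1 + (innerA fc 1 0 [] [] rest).2.2.1.length) := by
      simpa using PySem.List.slice_natCast_add (fc :: rest) 0 (1 + (innerA fc 1 0 [] [] rest).2.2.1.length)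
    have htake : (fc :: rest).take (1 + (innerA fc 1 0 [] [] rest).2.2.1.length) =
        fc :: (innerA fc 1 0 [] [] rest).2.2.1 := by
      rw [hY]
      simp
    rw [buildB]
    simp only [Nat.cast_zero] at h0 ⊢
    rw [h0, htake]
    simp [buildB, h2]
  | case4 fc rest t ht hcond ih =>
    have hacc := innerA_acc fc rest 1 0 [String.ofList [fc]] [fc]
    have ht' : ¬ (innerA fc 1 0 [String.ofList [fc]] [fc] rest).2.2.2.2.2 = true := ht
    have hc' : ¬ ((innerA fc 1 0 [String.ofList [fc]] [fc] rest).1 = [] ∧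
        (innerA fc 1 0 [String.ofList [fc]] [fc] rest).2.2.2.1 ≠
          (innerA fc 1 0 [String.ofList [fc]] [fc] rest).2.2.2.2.1) := hcond
    rw [hacc] at ht' hc'
    simp only at ht' hc'
    obtain ⟨h1, h2, h3, h4⟩ := innerA_props rest fc 1 0 (by norm_num)
    have hbf : (innerA fc 1 0 [] [] rest).2.2.2.2.2 = false := by
      cases hx : (innerA fc 1 0 [] [] rest).2.2.2.2.2
      · rfl
      · exact absurd hx ht'
    exact absurd ⟨(h3 hbf).1, (h3 hbf).2⟩ hc'

-- ===== VERDICT (by name: the statement is the Claim_ definition above) =====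
theorem solution_spec : Claim_equal_solution := by
  intro s _
  unfold Spec_solution solution solution_alt
  exact outerA_eq s.toList
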